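-- pv_equiv track=rewrite | github.com/telebid-interns/training-projects | taesko/speed/speed.py | has_path_between
-- ===== SOURCE A (Python) =====
-- def has_path_between(paths, city_a, city_b):
--     for p in paths:
--         a_found = False
--         b_found = False
--         for conn in p:
--             a_found = True if city_a in conn else a_found
--             b_found = True if city_b in conn else b_found
--             if a_found and b_found:
--                 return True
--     return False
-- ===== SOURCE B (Python) =====
-- def has_path_between(paths, city_a, city_b):
--     # Build an inverted index once: city -> set of indices of paths touching it,
--     # then answer by intersecting the two index sets.
--     index = {}
--     for i, p in enumerate(paths):
--         for conn in p:
--             for city in conn: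
--                 index.setdefault(city, set()).add(i)
--     a_paths = index.get(city_a, set())
--     b_paths = index.get(city_b, set())
--     return not a_paths.isdisjoint(b_paths)
-- ===== Notes on version B (the rewrite author's own statement) =====
-- stated objective: alternative
-- what changed: Replaces A's per-path scan with two flags and early return by an inverted index built in one pass (a dict mapping each city to the set of path indices that touch it); the answer is whether the index sets of the two cities intersect.
import Mathlib
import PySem

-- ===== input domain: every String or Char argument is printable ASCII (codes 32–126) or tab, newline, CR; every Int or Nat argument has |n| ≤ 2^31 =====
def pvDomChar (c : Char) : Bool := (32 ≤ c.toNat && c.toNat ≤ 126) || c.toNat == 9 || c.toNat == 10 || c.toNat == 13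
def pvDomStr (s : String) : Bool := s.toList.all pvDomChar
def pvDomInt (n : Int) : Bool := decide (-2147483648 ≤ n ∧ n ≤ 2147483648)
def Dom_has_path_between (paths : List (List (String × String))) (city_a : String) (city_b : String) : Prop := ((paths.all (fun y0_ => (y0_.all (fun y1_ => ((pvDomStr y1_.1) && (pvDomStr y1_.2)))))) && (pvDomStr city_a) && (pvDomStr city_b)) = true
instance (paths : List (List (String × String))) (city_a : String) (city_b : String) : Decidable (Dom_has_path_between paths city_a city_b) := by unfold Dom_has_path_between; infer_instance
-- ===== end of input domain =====

-- B replaces A's per-path flag scan by an inverted index (city -> set of path indices) built once,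
-- answering by intersecting the index sets of the two cities (alternative algorithm, same order of cost).

-- ===== PORT A =====
-- inner loop of A over a path's connections, carrying the two flags; 'city in conn' on a 2-tuple is element equality
def pvInnerA (city_a city_b : String) : List (String × String) → Bool → Bool → Bool
  | [], _, _ => false
  | conn :: rest, a_found, b_found =>
    let a_found' := if conn.1 == city_a || conn.2 == city_a then true else a_found
    let b_found' := if conn.1 == city_b || conn.2 == city_b then true else b_found
    if a_found' && b_found' then true else pvInnerA city_a city_b rest a_found' b_found'

def has_path_between (paths : List (List (String × String))) (city_a : String) (city_b : String) : Bool :=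
  match paths with
  | [] => false
  | p :: rest =>
    if pvInnerA city_a city_b p false false then true
    else has_path_between rest city_a city_b

-- ===== PORT B =====
-- 'index.setdefault(city, set()).add(i)' is d.modify city ∅ (·.add i); 'for city in conn' visits both components
def pvIndexB (paths : List (List (String × String))) : PySem.Dict String (PySem.Set Int) :=
  (PySem.List.enumerate paths 0).foldl
    (fun d ip =>
      ip.2.foldl
        (fun d conn =>
          (d.modify conn.1 PySem.Set.empty (fun s => PySem.Set.add s ip.1)).modify
            conn.2 PySem.Set.empty (fun s => PySem.Set.add s ip.1))
        d)
    PySem.Dict.empty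

def has_path_between_alt (paths : List (List (String × String))) (city_a : String) (city_b : String) : Bool :=
  let index := pvIndexB paths
  let a_paths := index.getD city_a PySem.Set.empty
  let b_paths := index.getD city_b PySem.Set.empty
  !(PySem.Set.isdisjoint a_paths b_paths)

-- ===== PRECONDITION & SPEC =====
def Spec_has_path_between (paths : List (List (String × String))) (city_a : String) (city_b : String) (out : Bool) : Prop := out = has_path_between_alt paths city_a city_b
instance (paths : List (List (String × String))) (city_a : String) (city_b : String) (out : Bool) : Decidable (Spec_has_path_between paths city_a city_b out) := by unfold Spec_has_path_between; infer_instance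

-- ===== CLAIM (what is proved, stated in full; the proofs are below) =====
def Claim_equal_has_path_between : Prop := ∀ (paths : List (List (String × String))) (city_a : String) (city_b : String), Dom_has_path_between paths city_a city_b → Spec_has_path_between paths city_a city_b (has_path_between paths city_a city_b)

-- ===== LEMMAS AND PROOFS =====

-- whether a path touches a city ('city in conn' for some conn of the path)
def pvTouches (c : String) (p : List (String × String)) : Bool :=
  p.any (fun conn => conn.1 == c || conn.2 == c)

-- On a NONEMPTY path, A's flag loop returns exactly "(initial a-flag or path touches a) and (… b …)".
theorem pvInnerA_eq (city_a city_b : String) (conn : String × String)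
    (rest : List (String × String)) (af bf : Bool) :
    pvInnerA city_a city_b (conn :: rest) af bf =
      ((af || pvTouches city_a (conn :: rest)) && (bf || pvTouches city_b (conn :: rest))) := by
  induction rest generalizing conn af bf with
  | nil =>
    cases hca : (conn.1 == city_a || conn.2 == city_a) <;>
      cases hcb : (conn.1 == city_b || conn.2 == city_b) <;>
      cases af <;> cases bf <;>
      simp [pvInnerA, pvTouches, hca, hcb]
  | cons c2 tl ih =>
    conv_lhs => rw [pvInnerA]
    rw [ih]
    cases hca : (conn.1 == city_a || conn.2 == city_a) <;>
      cases hcb : (conn.1 == city_b || conn.2 == city_b) <;>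
      cases af <;> cases bf <;>
      simp [pvTouches, hca, hcb, List.any_cons, Bool.or_assoc]

-- A in closed form: some path touches both cities.
theorem hpbA_eq_any (paths : List (List (String × String))) (city_a city_b : String) :
    has_path_between paths city_a city_b =
      paths.any (fun p => pvTouches city_a p && pvTouches city_b p) := by
  induction paths with
  | nil => rfl
  | cons p rest ih =>
    show (if pvInnerA city_a city_b p false false then true
          else has_path_between rest city_a city_b) = _
    rw [List.any_cons, ih]
    cases p with
    | nil => simp [pvInnerA, pvTouches]
    | cons c tl =>
      rw [pvInnerA_eq]
      simp only [Bool.false_or]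
      cases h : (pvTouches city_a (c :: tl) && pvTouches city_b (c :: tl)) <;> simp_all

-- one step of B's inner loop: indexing one connection under both its components
theorem step_memB (d : PySem.Dict String (PySem.Set Int)) (conn : String × String)
    (j : Int) (c : String) (i : Int) :
    (i ∈ ((d.modify conn.1 PySem.Set.empty (fun s => PySem.Set.add s j)).modify
        conn.2 PySem.Set.empty (fun s => PySem.Set.add s j)).getD c PySem.Set.empty) ↔
      i ∈ d.getD c PySem.Set.empty ∨ (i = j ∧ (conn.1 = c ∨ conn.2 = c)) := by
  rw [PySem.Dict.getD_modify]
  split_ifs with h2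
  · subst h2
    rw [PySem.Set.mem_add, PySem.Dict.getD_modify]
    split_ifs with h21
    · rw [PySem.Set.mem_add, h21]
      tauto
    · tauto
  · rw [PySem.Dict.getD_modify]
    split_ifs with h1
    · subst h1
      rw [PySem.Set.mem_add]
      tauto
    · constructor
      · exact Or.inl
      · rintro (h | ⟨_, (h' | h')⟩)
        · exact h
        · exact absurd h'.symm h1
        · exact absurd h'.symm h2

-- membership in the index after B's inner loop over one path (index j, accumulator d)
theorem mem_getD_innerB (p : List (String × String)) (d : PySem.Dict String (PySem.Set Int))
    (j : Int) (c : String) (i : Int) :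
    (i ∈ (p.foldl
        (fun d conn =>
          (d.modify conn.1 PySem.Set.empty (fun s => PySem.Set.add s j)).modify
            conn.2 PySem.Set.empty (fun s => PySem.Set.add s j)) d).getD c PySem.Set.empty) ↔
      i ∈ d.getD c PySem.Set.empty ∨ (i = j ∧ pvTouches c p = true) := by
  induction p generalizing d with
  | nil => simp [pvTouches]
  | cons conn rest ih =>
    rw [List.foldl_cons, ih, step_memB]
    simp only [pvTouches, List.any_cons, Bool.or_eq_true, beq_iff_eq]
    tauto

-- membership in the index after B's outer loop over an enumerated suffix
theorem mem_getD_outerB (l : List (Int × List (String × String)))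
    (d : PySem.Dict String (PySem.Set Int)) (c : String) (i : Int) :
    (i ∈ (l.foldl
        (fun d ip =>
          ip.2.foldl
            (fun d conn =>
              (d.modify conn.1 PySem.Set.empty (fun s => PySem.Set.add s ip.1)).modify
                conn.2 PySem.Set.empty (fun s => PySem.Set.add s ip.1)) d) d).getD c PySem.Set.empty) ↔
      i ∈ d.getD c PySem.Set.empty ∨ ∃ ip ∈ l, ip.1 = i ∧ pvTouches c ip.2 = true := by
  induction l generalizing d with
  | nil => simp
  | cons ip rest ih =>
    rw [List.foldl_cons, ih, mem_getD_innerB]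
    constructor
    · rintro ((h | ⟨rfl, h⟩) | ⟨q, hq, h⟩)
      · exact Or.inl h
      · exact Or.inr ⟨ip, List.mem_cons_self, rfl, h⟩
      · exact Or.inr ⟨q, List.mem_cons_of_mem _ hq, h⟩
    · rintro (h | ⟨q, hq, h1, h2⟩)
      · exact Or.inl (Or.inl h)
      · rcases List.mem_cons.1 hq with rfl | hq
        · exact Or.inl (Or.inr ⟨h1.symm, h2⟩)
        · exact Or.inr ⟨q, hq, h1, h2⟩

-- characterisation of B's index: i is indexed under c iff i is the index of a path touching c
theorem mem_pvIndexB (paths : List (List (String × String))) (c : String) (i : Int) :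
    (i ∈ (pvIndexB paths).getD c PySem.Set.empty) ↔
      ∃ (k : Nat) (h : k < paths.length), (i : Int) = k ∧ pvTouches c paths[k] = true := by
  rw [pvIndexB, mem_getD_outerB]
  constructor
  · rintro (h | ⟨ip, hip, h1, h2⟩)
    · simp [PySem.Dict.getD_empty, PySem.Set.empty] at h
    · obtain ⟨k, hk, rfl⟩ := (PySem.List.mem_enumerate_iff _ _ _).1 hip
      exact ⟨k, hk, by simpa using h1.symm, h2⟩
  · rintro ⟨k, hk, rfl, h⟩
    exact Or.inr ⟨((k : Int), paths[k]),
      (PySem.List.mem_enumerate_iff _ _ _).2 ⟨k, hk, by simp⟩, by simp, h⟩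

theorem main_eq (paths : List (List (String × String))) (city_a city_b : String) :
    has_path_between paths city_a city_b = has_path_between_alt paths city_a city_b := by
  rw [hpbA_eq_any, has_path_between_alt]
  simp only [PySem.Set.isdisjoint, Bool.not_not]
  rw [Bool.eq_iff_iff, List.any_eq_true, List.any_eq_true]
  constructor
  · rintro ⟨p, hp, h⟩
    rcases List.mem_iff_getElem.1 hp with ⟨k, hk, rfl⟩
    rcases Bool.and_eq_true_iff.1 h with ⟨ha, hb⟩
    refine ⟨(k : Int), (mem_pvIndexB paths city_a k).2 ⟨k, hk, rfl, ha⟩, ?_⟩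
    simp only [PySem.Set.contains]
    exact List.contains_iff_mem.2 ((mem_pvIndexB paths city_b k).2 ⟨k, hk, rfl, hb⟩)
  · rintro ⟨i, hi, hc⟩
    rcases (mem_pvIndexB paths city_a i).1 hi with ⟨k, hk, rfl, ha⟩
    have hb := (mem_pvIndexB paths city_b (k : Int)).1
      (List.contains_iff_mem.1 (by simpa [PySem.Set.contains] using hc))
    rcases hb with ⟨k', hk', hkk, hb⟩
    have : k = k' := by exact_mod_cast hkk
    subst this
    exact ⟨paths[k], List.getElem_mem hk, by simp [ha, hb]⟩

-- ===== VERDICT (by name: the statement is the Claim_ definition above) =====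
theorem has_path_between_spec : Claim_equal_has_path_between := by
  intro paths a b _
  unfold Spec_has_path_between
  exact main_eq paths a b
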